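-- pv_equiv track=rewrite | github.com/google-deepmind/pysc2 | pysc2/env/sc2_env.py | crop_and_deduplicate_names
-- ===== SOURCE A (Python) =====
-- import collections
--
-- def crop_and_deduplicate_names(names):
--   """Crops and de-duplicates the passed names.
--
--   SC2 gets confused in a multi-agent game when agents have the same
--   name. We check for name duplication to avoid this, but - SC2 also
--   crops player names to a hard character limit, which can again lead
--   to duplicate names. To avoid this we unique-ify names if they are
--   equivalent after cropping. Ideally SC2 would handle duplicate names,
--   making this unnecessary.
--
--   TODO(b/121092563): Fix this in the SC2 binary.
--
--   Args:
--     names: List of names.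
--
--   Returns:
--     De-duplicated names cropped to 32 characters.
--   """
--   max_name_length = 32
--
--   # Crop.
--   cropped = [n[:max_name_length] for n in names]
--
--   # De-duplicate.
--   deduplicated = []
--   name_counts = collections.Counter(n for n in cropped)
--   name_index = collections.defaultdict(lambda: 1)
--   for n in cropped:
--     if name_counts[n] == 1:
--       deduplicated.append(n)
--     else:
--       deduplicated.append("({}) {}".format(name_index[n], n))
--       name_index[n] += 1
--
--   # Crop again.
--   recropped = [n[:max_name_length] for n in deduplicated]
--   if len(set(recropped)) != len(recropped):
--     raise ValueError("Failed to de-duplicate names")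
--
--   return recropped
-- ===== SOURCE B (Python) =====
-- import collections
--
--
-- def crop_and_deduplicate_names(names):
--   """Crops and de-duplicates the passed names (group-by rewrite).
--
--   Groups the indices of every cropped name in one pass, then scatter-writes
--   plain names (unique groups) or "(k) name" entries (duplicated groups, 1-based
--   in position order) into a pre-allocated result list, re-crops and checks.
--   """
--   max_name_length = 32
--
--   cropped = [n[:max_name_length] for n in names]
--
--   positions = collections.defaultdict(list)
--   for i, n in enumerate(cropped):
--     positions[n].append(i)
--
--   result = [None] * len(names)
--   for n, idxs in positions.items():
--     if len(idxs) == 1: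
--       result[idxs[0]] = n
--     else:
--       for k, i in enumerate(idxs):
--         result[i] = "({}) {}".format(k + 1, n)
--
--   recropped = [n[:max_name_length] for n in result]
--   if len(set(recropped)) != len(recropped):
--     raise ValueError("Failed to de-duplicate names")
--
--   return recropped
-- ===== Notes on version B (the rewrite author's own statement) =====
-- stated objective: alternative
-- what changed: B builds one dict mapping each cropped name to the list of indices where it occurs, then scatter-writes plain names (singleton groups) or 1-based numbered names into a pre-allocated result list, instead of A's forward pass that consults a precomputed Counter and a running defaultdict of next occurrence numbers.
import Mathlib
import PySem

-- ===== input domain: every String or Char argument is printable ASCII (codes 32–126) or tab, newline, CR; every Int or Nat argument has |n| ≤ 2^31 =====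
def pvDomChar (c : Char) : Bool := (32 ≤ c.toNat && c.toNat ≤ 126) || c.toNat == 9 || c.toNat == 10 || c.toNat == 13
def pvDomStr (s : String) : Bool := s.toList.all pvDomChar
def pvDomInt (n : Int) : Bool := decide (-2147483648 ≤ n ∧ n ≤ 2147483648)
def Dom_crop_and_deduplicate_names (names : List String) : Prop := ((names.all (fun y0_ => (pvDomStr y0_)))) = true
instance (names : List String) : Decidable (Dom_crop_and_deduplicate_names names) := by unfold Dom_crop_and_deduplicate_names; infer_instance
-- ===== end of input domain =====

-- B regroups: one dict from cropped name to its index list, then scatter-writes plain / "(k) name"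
-- entries into a pre-allocated result, instead of A's forward pass with a Counter plus a running
-- index dict (objective: alternative decomposition, same cost). Equivalence of RETURN values.

-- n[:32]
def pvCrop (s : String) : String := PySem.Str.slice s none (some 32)

-- "({}) {}".format(i, n) — ported by hand via List Char (exact: '(' ++ str(i) ++ ') ' ++ n)
def pvFmt (i : Int) (n : String) : String :=
  String.ofList ('(' :: (PySem.Int.toChars i ++ ')' :: ' ' :: n.toList))

-- ===== PORT A =====
-- literal transliteration of A; the final duplicate check raises ValueError in Python —
-- exactly those inputs are excluded by Pre_ below, the port returns the recropped list.
def crop_and_deduplicate_names (names : List String) : List String :=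
  let cropped := names.map (fun n => pvCrop n)
  let name_counts := PySem.Dict.counter cropped
  let st := cropped.foldl
    (fun (st : List String × PySem.Dict String Int) n =>
      if name_counts.getD n 0 = 1 then (st.1 ++ [n], st.2)
      else (st.1 ++ [pvFmt (st.2.getD n 1) n], st.2.insert n (st.2.getD n 1 + 1)))
    ([], PySem.Dict.empty)
  st.1.map (fun n => pvCrop n)

-- ===== PORT B =====
-- literal transliteration of Source B; Python's [None]*len(names) placeholder is ported as ""
-- (every slot is overwritten — proved below); the same final duplicate check raises outside Pre_.
def crop_and_deduplicate_names_alt (names : List String) : List String :=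
  let cropped := names.map (fun n => pvCrop n)
  let positions := (PySem.List.enumerate cropped).foldl
    (fun (d : PySem.Dict String (List Int)) p => d.modify p.2 [] (fun v => v ++ [p.1]))
    PySem.Dict.empty
  let result := positions.items.foldl
    (fun res p =>
      if p.2.length = 1 then PySem.List.pySetD res (PySem.List.pyGetD p.2 0 0) p.1
      else (PySem.List.enumerate p.2).foldl
        (fun r q => PySem.List.pySetD r q.2 (pvFmt (q.1 + 1) p.1)) res)
    (List.replicate names.length "")
  result.map (fun n => pvCrop n)

-- ===== PRECONDITION & SPEC =====
-- the value both programs compute before the final duplicate check: cropped names, the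
-- duplicated ones numbered "(k) name" in order of appearance (k = 1-based occurrence rank)
def pvEntry (cs : List String) (i : Nat) (c : String) : String :=
  if cs.count c = 1 then c else pvFmt (((cs.take i).count c : Int) + 1) c

def pvSpecFrom (cs : List String) : Nat → List String → List String
  | _, [] => []
  | i, n :: t => pvEntry cs i n :: pvSpecFrom cs (i + 1) t

def pvSpecList (cs : List String) : List String := pvSpecFrom cs 0 cs

-- Pre_ excludes exactly the inputs on which A raises ValueError("Failed to de-duplicate names"):
-- those where the numbered names, re-cropped to 32 characters, still collide; B raises the same
-- ValueError on exactly those inputs, so no returned value of A is excluded.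
def Pre_crop_and_deduplicate_names (names : List String) : Prop :=
  ((pvSpecList (names.map pvCrop)).map pvCrop).Nodup
instance (names : List String) : Decidable (Pre_crop_and_deduplicate_names names) := by
  unfold Pre_crop_and_deduplicate_names; infer_instance

def pvWitness_crop_and_deduplicate_names : List String := ["marine", "marine", "zergling"]

def Spec_crop_and_deduplicate_names (names : List String) (out : List String) : Prop :=
  out = crop_and_deduplicate_names_alt names
instance (names : List String) (out : List String) : Decidable (Spec_crop_and_deduplicate_names names out) := by
  unfold Spec_crop_and_deduplicate_names; infer_instance

-- ===== CLAIM (what is proved, stated in full; the proofs are below) =====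
def Claim_equal_crop_and_deduplicate_names : Prop := ∀ (names : List String), Dom_crop_and_deduplicate_names names → Pre_crop_and_deduplicate_names names → Spec_crop_and_deduplicate_names names (crop_and_deduplicate_names names)

-- ===== LEMMAS AND PROOFS =====

-- ---- A side: the stateful loop produces pvSpecList ----
lemma pvLoopA (full : List String) (rest : List String) :
    ∀ (p acc : List String) (idx : PySem.Dict String Int),
    full = p ++ rest →
    (∀ m : String, full.count m ≠ 1 → idx.getD m 1 = (p.count m : Int) + 1) →
    (rest.foldl
      (fun (st : List String × PySem.Dict String Int) n =>
        if (PySem.Dict.counter full).getD n 0 = 1 then (st.1 ++ [n], st.2)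
        else (st.1 ++ [pvFmt (st.2.getD n 1) n], st.2.insert n (st.2.getD n 1 + 1)))
      (acc, idx)).1 = acc ++ pvSpecFrom full p.length rest := by
  induction rest with
  | nil => intro p acc idx _ _; simp [pvSpecFrom]
  | cons n rest ih =>
      intro p acc idx hfull hidx
      simp only [List.foldl_cons]
      by_cases h : full.count n = 1
      · rw [if_pos (show (PySem.Dict.counter full).getD n 0 = 1 by
          rw [PySem.Dict.getD_counter]; exact_mod_cast h)]
        have hfull' : full = (p ++ [n]) ++ rest := by rw [hfull, List.append_assoc]; rfl
        have hidx' : ∀ m : String, full.count m ≠ 1 →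
            idx.getD m 1 = ((p ++ [n]).count m : Int) + 1 := by
          intro m hm
          rcases eq_or_ne m n with rfl | hmn
          · exact absurd h hm
          · have hc : (p ++ [n]).count m = p.count m := by
              simp [List.count_append, Ne.symm hmn]
            rw [hc]
            exact hidx m hm
        rw [ih (p ++ [n]) (acc ++ [n]) idx hfull' hidx']
        simp [pvSpecFrom, pvEntry, h, List.append_assoc]
      · rw [if_neg (show ¬ (PySem.Dict.counter full).getD n 0 = 1 by
          rw [PySem.Dict.getD_counter]; exact_mod_cast h)]
        have hfull' : full = (p ++ [n]) ++ rest := by rw [hfull, List.append_assoc]; rfl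
        have hgd : idx.getD n 1 = (p.count n : Int) + 1 := hidx n h
        have hidx' : ∀ m : String, full.count m ≠ 1 →
            (idx.insert n (idx.getD n 1 + 1)).getD m 1 = ((p ++ [n]).count m : Int) + 1 := by
          intro m hm
          rcases eq_or_ne m n with rfl | hmn
          · rw [PySem.Dict.getD_insert_self, hgd]
            have hc : (p ++ [m]).count m = p.count m + 1 := by
              simp [List.count_append]
            rw [hc]
            push_cast
            ring
          · rw [PySem.Dict.getD_insert_of_ne _ _ _ hmn]
            have hc : (p ++ [n]).count m = p.count m := by
              simp [List.count_append, Ne.symm hmn]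
            rw [hc]
            exact hidx m hm
        rw [ih (p ++ [n]) _ _ hfull' hidx']
        have htake : full.take p.length = p := by rw [hfull]; exact List.take_left
        simp [pvSpecFrom, pvEntry, h, hgd, htake, List.append_assoc]

lemma pvPortA_eq (names : List String) :
    crop_and_deduplicate_names names = (pvSpecList (names.map pvCrop)).map pvCrop := by
  simp only [crop_and_deduplicate_names]
  rw [pvLoopA (names.map (fun n => pvCrop n)) (names.map (fun n => pvCrop n)) [] []
    PySem.Dict.empty rfl (by intro m _; simp [PySem.Dict.getD_empty])]
  simp [pvSpecList]

-- ---- B side ----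
-- positions of c in cs, in order (the index lists the grouping dict accumulates)
def pvPos : List String → String → List Int
  | [], _ => []
  | x :: t, c => (if x = c then [0] else []) ++ (pvPos t c).map (· + 1)

lemma pvPos_nonneg (cs : List String) (c : String) : ∀ i ∈ pvPos cs c, 0 ≤ i := by
  induction cs with
  | nil => simp [pvPos]
  | cons x t ih =>
      intro i hi
      simp only [pvPos] at hi
      rcases List.mem_append.1 hi with h | h
      · split at h <;> simp_all
      · obtain ⟨i0, hi0, rfl⟩ := List.mem_map.1 h
        have := ih i0 hi0; omega

lemma pvPos_lt (cs : List String) (c : String) : ∀ i ∈ pvPos cs c, i < (cs.length : Int) := by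
  induction cs with
  | nil => simp [pvPos]
  | cons x t ih =>
      intro i hi
      simp only [pvPos] at hi
      rcases List.mem_append.1 hi with h | h
      · have : i = 0 := by split at h <;> simp_all
        subst this
        simp only [List.length_cons]; push_cast; omega
      · obtain ⟨i0, hi0, rfl⟩ := List.mem_map.1 h
        have := ih i0 hi0
        simp only [List.length_cons]; push_cast; omega

lemma pvPos_length (cs : List String) (c : String) : (pvPos cs c).length = cs.count c := by
  induction cs with
  | nil => simp [pvPos]
  | cons x t ih =>
      simp only [pvPos, List.length_append, List.length_map, ih, List.count_cons]
      by_cases h : x = c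
      · simp [h]; omega
      · simp [h]

lemma pvPos_nodup (cs : List String) (c : String) : (pvPos cs c).Nodup := by
  induction cs with
  | nil => simp [pvPos]
  | cons x t ih =>
      simp only [pvPos]
      have hinj : Function.Injective (fun a : Int => a + 1) := by
        intro a b hab; simpa using hab
      by_cases h : x = c
      · simp only [h, if_true, List.singleton_append]
        refine List.Nodup.cons ?_ (ih.map hinj)
        intro hmem
        obtain ⟨i0, hi0, hx⟩ := List.mem_map.1 hmem
        have := pvPos_nonneg t c i0 hi0
        omega
      · simp only [if_neg h, List.nil_append]
        exact ih.map hinj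

lemma pvIndex?_map_add_one (L : List Int) (v : Int) :
    PySem.List.index? (L.map (· + 1)) (v + 1) = PySem.List.index? L v := by
  induction L with
  | nil => simp [pysem]
  | cons x t ih =>
      simp only [List.map_cons]
      by_cases h : x = v
      · subst h
        rw [PySem.List.index?_cons_self, PySem.List.index?_cons_self]
      · have hne : x + 1 ≠ v + 1 := by omega
        rw [PySem.List.index?_cons_of_ne _ hne, ih, PySem.List.index?_cons_of_ne _ h]

lemma pvPos_index? (cs : List String) (c : String) :
    ∀ (j : Nat), PySem.List.index? (pvPos cs c) (j : Int) =
      if cs[j]? = some c then some ((cs.take j).count c) else none := by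
  induction cs with
  | nil => intro j; simp [pvPos, pysem]
  | cons x t ih =>
      intro j
      simp only [pvPos]
      by_cases h : x = c
      · subst h
        simp only [if_true, List.singleton_append]
        cases j with
        | zero =>
            rw [show ((0 : Nat) : Int) = 0 by norm_num, PySem.List.index?_cons_self]
            simp
        | succ j' =>
            have hne : (0 : Int) ≠ ((j' + 1 : Nat) : Int) := by push_cast; omega
            rw [PySem.List.index?_cons_of_ne _ hne,
                show (((j' + 1 : Nat)) : Int) = ((j' : Nat) : Int) + 1 by push_cast; ring,
                pvIndex?_map_add_one, ih j']
            by_cases ht : t[j']? = some x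
            · simp [ht]
            · simp [ht]
      · simp only [if_neg h, List.nil_append]
        cases j with
        | zero =>
            have h0 : PySem.List.index? ((pvPos t c).map (· + 1)) ((0 : Nat) : Int) = none := by
              rw [PySem.List.index?_eq_none_iff]
              intro hmem
              obtain ⟨i0, hi0, hx⟩ := List.mem_map.1 hmem
              have := pvPos_nonneg t c i0 hi0
              omega
            rw [h0]
            simp [h]
        | succ j' =>
            rw [show (((j' + 1 : Nat)) : Int) = ((j' : Nat) : Int) + 1 by push_cast; ring,
                pvIndex?_map_add_one, ih j']
            by_cases ht : t[j']? = some c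
            · simp [ht, h]
            · simp [ht]

lemma pvGetD_groups (l : List (Int × String)) :
    ∀ (d : PySem.Dict String (List Int)) (c : String),
    (l.foldl (fun d p => d.modify p.2 [] (fun v => v ++ [p.1])) d).getD c []
      = d.getD c [] ++ (l.filter (fun p => p.2 == c)).map (·.1) := by
  induction l with
  | nil => intro d c; simp
  | cons p l ih =>
      intro d c
      simp only [List.foldl_cons, List.filter_cons]
      rw [ih]
      by_cases h : p.2 = c
      · subst h
        rw [PySem.Dict.getD_modify_self]
        simp [List.append_assoc]
      · rw [PySem.Dict.getD_modify_of_ne _ _ _ (fun hc => h hc.symm)]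
        simp [show (p.2 == c) = false by simpa using h]

lemma pvFilterEnum (cs : List String) (c : String) :
    ∀ (s : Int), ((PySem.List.enumerate cs s).filter (fun p => p.2 == c)).map (·.1)
      = (pvPos cs c).map (fun i => s + i) := by
  induction cs with
  | nil => intro s; simp [PySem.List.enumerate_nil, pvPos]
  | cons x t ih =>
      intro s
      have hmm : ∀ (L : List Int) (a : Int),
          (L.map (· + 1)).map (fun i => a + i) = L.map (fun i => (a + 1) + i) := by
        intro L a
        rw [List.map_map]
        apply List.map_congr_left
        intro b _
        simp [Function.comp]
        ring
      simp only [PySem.List.enumerate_cons, pvPos]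
      by_cases h : x = c
      · subst h
        rw [List.filter_cons_of_pos (by simp)]
        simp only [List.map_cons, List.singleton_append, if_true]
        rw [ih (s + 1), hmm]
        simp
      · rw [List.filter_cons_of_neg (by simpa using h)]
        simp only [if_neg h, List.nil_append]
        rw [ih (s + 1), hmm]

lemma pvFind?_enumerate (L : List Int) :
    ∀ (s j : Int), (PySem.List.enumerate L s).find? (fun q => q.2 == j)
      = (PySem.List.index? L j).map (fun k => (s + (k : Int), j)) := by
  induction L with
  | nil => intro s j; simp [PySem.List.enumerate_nil, pysem]
  | cons x t ih =>
      intro s j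
      simp only [PySem.List.enumerate_cons]
      by_cases h : x = j
      · subst h
        rw [List.find?_cons_of_pos (by simp), PySem.List.index?_cons_self]
        simp
      · rw [List.find?_cons_of_neg (by simpa using h), ih (s + 1),
          PySem.List.index?_cons_of_ne _ h]
        cases h' : PySem.List.index? t j with
        | none => simp
        | some k =>
            simp [Prod.ext_iff]
            ring

lemma pvScatter (g : Int × Int → String) (ps : List (Int × Int)) :
    ∀ (res : List String) (j : Nat),
    ps.Pairwise (fun a b => a.2 ≠ b.2) →
    (∀ q ∈ ps, 0 ≤ q.2 ∧ q.2 < (res.length : Int)) →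
    (ps.foldl (fun r q => PySem.List.pySetD r q.2 (g q)) res)[j]?
      = match ps.find? (fun q => q.2 == (j : Int)) with
        | some q => some (g q)
        | none => res[j]? := by
  induction ps with
  | nil => intro res j _ _; simp
  | cons q ps ih =>
      intro res j hpw hrange
      have hq := hrange q (by simp)
      have hlen' : (PySem.List.pySetD res q.2 (g q)).length = res.length :=
        PySem.List.length_pySetD res q.2 (g q)
      simp only [List.foldl_cons]
      rw [ih (PySem.List.pySetD res q.2 (g q)) j (List.Pairwise.of_cons hpw)
        (by intro q' hq'; rw [hlen']; exact hrange q' (by simp [hq']))]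
      by_cases h : q.2 = (j : Int)
      · have hfind : ps.find? (fun q' => q'.2 == (j : Int)) = none := by
          apply List.find?_eq_none.2
          intro q' hq'
          have := (List.pairwise_cons.1 hpw).1 q' hq'
          simp only [beq_iff_eq]
          omega
        rw [List.find?_cons_of_pos (by simpa using h), hfind,
          PySem.List.pySetD_of_nonneg _ _ hq.1, List.getElem?_set]
        have hjn : q.2.toNat = j := by omega
        have hjl : j < res.length := by
          have := hq.2
          omega
        simp [hjn, hjl]
      · rw [List.find?_cons_of_neg (by simpa using h)]
        cases hf : ps.find? (fun q' => q'.2 == (j : Int)) with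
        | some q' => rfl
        | none =>
            rw [PySem.List.pySetD_of_nonneg _ _ hq.1, List.getElem?_set]
            have : q.2.toNat ≠ j := by omega
            simp [this]

lemma pvScatter_length (g : Int × Int → String) (ps : List (Int × Int)) :
    ∀ (res : List String),
    (ps.foldl (fun r q => PySem.List.pySetD r q.2 (g q)) res).length = res.length := by
  induction ps with
  | nil => intro res; rfl
  | cons q ps ih =>
      intro res
      simp only [List.foldl_cons]
      rw [ih, PySem.List.length_pySetD]

lemma pvWriteGroup (cs : List String) (c : String) (res : List String)
    (hlen : res.length = cs.length) (j : Nat) :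
    ((if (pvPos cs c).length = 1
      then PySem.List.pySetD res (PySem.List.pyGetD (pvPos cs c) 0 0) c
      else (PySem.List.enumerate (pvPos cs c)).foldl
        (fun r q => PySem.List.pySetD r q.2 (pvFmt (q.1 + 1) c)) res))[j]?
    = if cs[j]? = some c then some (pvEntry cs j c) else res[j]? := by
  by_cases hl : (pvPos cs c).length = 1
  · rw [if_pos hl]
    have hcount : cs.count c = 1 := by rw [← pvPos_length]; exact hl
    obtain ⟨i0, hi0⟩ := List.length_eq_one_iff.1 hl
    have hidx := pvPos_index? cs c j
    rw [hi0] at hidx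
    have hnn : 0 ≤ i0 := pvPos_nonneg cs c i0 (by simp [hi0])
    rw [hi0, PySem.List.pyGetD_zero_cons, PySem.List.pySetD_of_nonneg _ _ hnn,
      List.getElem?_set]
    by_cases hj : cs[j]? = some c
    · have hsome : PySem.List.index? [i0] ((j : Nat) : Int) = some ((cs.take j).count c) := by
        rw [hidx, if_pos hj]
      have hmem : ((j : Nat) : Int) ∈ [i0] := by
        by_contra hmemn
        rw [← PySem.List.index?_eq_none_iff [i0] ((j : Nat) : Int)] at hmemn
        rw [hmemn] at hsome
        cases hsome
      have hji : i0.toNat = j := by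
        have : ((j : Nat) : Int) = i0 := by simpa using hmem
        omega
      have hjl : j < cs.length := by
        obtain ⟨hlt, -⟩ := List.getElem?_eq_some_iff.1 hj
        exact hlt
      have hcj : cs[j]'hjl = c := by
        have h2 := List.getElem?_eq_getElem hjl
        rw [hj] at h2
        exact (Option.some.inj h2).symm
      simp [hji, hlen, hjl, pvEntry, hcount, hcj]
    · have hnone : PySem.List.index? [i0] ((j : Nat) : Int) = none := by
        rw [hidx, if_neg hj]
      have hne : ¬ (i0.toNat = j) := by
        rw [PySem.List.index?_eq_none_iff] at hnone
        intro he
        exact hnone (by simp only [List.mem_singleton]; omega)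
      simp [hne, hj]
  · rw [if_neg hl]
    have hcount : cs.count c ≠ 1 := by rw [← pvPos_length]; exact hl
    have hpw : (PySem.List.enumerate (pvPos cs c)).Pairwise (fun a b => a.2 ≠ b.2) := by
      have h1 : ((PySem.List.enumerate (pvPos cs c) 0).map (fun q => q.2)).Nodup := by
        rw [PySem.List.map_snd_enumerate]
        exact pvPos_nodup cs c
      exact List.pairwise_map.1 h1
    have hrange : ∀ q ∈ PySem.List.enumerate (pvPos cs c), 0 ≤ q.2 ∧ q.2 < (res.length : Int) := by
      intro q hq
      have hq2 : q.2 ∈ pvPos cs c := by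
        rw [← PySem.List.map_snd_enumerate (pvPos cs c) 0]
        exact List.mem_map_of_mem hq
      refine ⟨pvPos_nonneg cs c q.2 hq2, ?_⟩
      rw [hlen]
      exact pvPos_lt cs c q.2 hq2
    rw [pvScatter (fun q => pvFmt (q.1 + 1) c) _ res j hpw hrange,
      pvFind?_enumerate (pvPos cs c) 0 ((j : Nat) : Int), pvPos_index? cs c j]
    by_cases hj : cs[j]? = some c
    · rw [if_pos hj]
      simp [pvEntry, hcount, hj]
    · rw [if_neg hj]
      simp [hj]

lemma pvWriteGroup_length (cs : List String) (c : String) (res : List String) :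
    ((if (pvPos cs c).length = 1
      then PySem.List.pySetD res (PySem.List.pyGetD (pvPos cs c) 0 0) c
      else (PySem.List.enumerate (pvPos cs c)).foldl
        (fun r q => PySem.List.pySetD r q.2 (pvFmt (q.1 + 1) c)) res)).length = res.length := by
  by_cases hl : (pvPos cs c).length = 1
  · rw [if_pos hl]
    exact PySem.List.length_pySetD _ _ _
  · rw [if_neg hl]
    exact pvScatter_length (fun q => pvFmt (q.1 + 1) c) _ res

lemma pvItemsFold (cs : List String) (K : List String) :
    ∀ (res : List String), res.length = cs.length →
    ∀ (j : Nat) (hj : j < cs.length),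
    ((K.map (fun k => (k, pvPos cs k))).foldl
      (fun res p =>
        if p.2.length = 1 then PySem.List.pySetD res (PySem.List.pyGetD p.2 0 0) p.1
        else (PySem.List.enumerate p.2).foldl
          (fun r q => PySem.List.pySetD r q.2 (pvFmt (q.1 + 1) p.1)) res)
      res)[j]?
    = if cs[j]'hj ∈ K then some (pvEntry cs j (cs[j]'hj)) else res[j]? := by
  induction K with
  | nil => intro res hlen j hj; simp
  | cons k K ih =>
      intro res hlen j hj
      simp only [List.map_cons, List.foldl_cons]
      have hlen' := pvWriteGroup_length cs k res
      rw [ih _ (by rw [hlen']; exact hlen) j hj, pvWriteGroup cs k res hlen j]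
      by_cases hck : cs[j]'hj = k
      · rw [List.getElem?_eq_getElem hj]
        simp [hck]
      · rw [List.getElem?_eq_getElem hj]
        simp [hck]

lemma pvSpecFrom_length (cs : List String) (t : List String) :
    ∀ i, (pvSpecFrom cs i t).length = t.length := by
  induction t with
  | nil => intro i; simp [pvSpecFrom]
  | cons n t ih => intro i; simp [pvSpecFrom, ih]

lemma pvSpecFrom_getElem? (cs : List String) (t : List String) :
    ∀ (i k : Nat) (hk : k < t.length),
    (pvSpecFrom cs i t)[k]? = some (pvEntry cs (i + k) (t[k]'hk)) := by
  induction t with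
  | nil => intro i k hk; simp at hk
  | cons n t ih =>
      intro i k hk
      cases k with
      | zero => simp [pvSpecFrom]
      | succ k' =>
          simp only [pvSpecFrom, List.getElem?_cons_succ, List.getElem_cons_succ]
          rw [ih (i+1) k' (by simpa using hk)]
          have h2 : i + 1 + k' = i + (k' + 1) := by omega
          rw [h2]

lemma pvItemsFold_length (cs : List String) (K : List String) :
    ∀ (res : List String),
    ((K.map (fun k => (k, pvPos cs k))).foldl
      (fun res p =>
        if p.2.length = 1 then PySem.List.pySetD res (PySem.List.pyGetD p.2 0 0) p.1
        else (PySem.List.enumerate p.2).foldl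
          (fun r q => PySem.List.pySetD r q.2 (pvFmt (q.1 + 1) p.1)) res)
      res).length = res.length := by
  induction K with
  | nil => intro res; rfl
  | cons k K ih =>
      intro res
      simp only [List.map_cons, List.foldl_cons]
      rw [ih, pvWriteGroup_length]

lemma pvPortB_eq (names : List String) :
    crop_and_deduplicate_names_alt names = (pvSpecList (names.map pvCrop)).map pvCrop := by
  simp only [crop_and_deduplicate_names_alt]
  have hkeys : ((PySem.List.enumerate (names.map (fun n => pvCrop n))).foldl
      (fun (d : PySem.Dict String (List Int)) p => d.modify p.2 [] (fun v => v ++ [p.1]))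
      PySem.Dict.empty).keys = PySem.Set.ofList (names.map (fun n => pvCrop n)) := by
    rw [PySem.Dict.keys_foldl_modify_key (PySem.List.enumerate (names.map (fun n => pvCrop n)))
      (fun p => p.2) [] (fun d p v => v ++ [p.1]) PySem.Dict.empty]
    rw [PySem.Dict.keys_empty, PySem.List.map_snd_enumerate, PySem.Set.update_eq_append_filter]
    simp
  have hitems : ((PySem.List.enumerate (names.map (fun n => pvCrop n))).foldl
      (fun (d : PySem.Dict String (List Int)) p => d.modify p.2 [] (fun v => v ++ [p.1]))
      PySem.Dict.empty).items
      = (PySem.Set.ofList (names.map (fun n => pvCrop n))).map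
          (fun k => (k, pvPos (names.map (fun n => pvCrop n)) k)) := by
    rw [PySem.Dict.items_eq_map_keys _ (by rw [hkeys]; exact PySem.Set.nodup_ofList _)
      ([] : List Int), hkeys]
    apply List.map_congr_left
    intro k _
    rw [pvGetD_groups, PySem.Dict.getD_empty, pvFilterEnum _ k 0]
    simp
  rw [hitems]
  have hres : (((PySem.Set.ofList (names.map (fun n => pvCrop n))).map
      (fun k => (k, pvPos (names.map (fun n => pvCrop n)) k))).foldl
      (fun res p =>
        if p.2.length = 1 then PySem.List.pySetD res (PySem.List.pyGetD p.2 0 0) p.1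
        else (PySem.List.enumerate p.2).foldl
          (fun r q => PySem.List.pySetD r q.2 (pvFmt (q.1 + 1) p.1)) res)
      (List.replicate names.length ""))
      = pvSpecList (names.map (fun n => pvCrop n)) := by
    apply List.ext_getElem?
    intro j
    by_cases hj : j < (names.map (fun n => pvCrop n)).length
    · rw [pvItemsFold _ _ _ (by simp) j hj,
        if_pos ((PySem.Set.mem_ofList _ _).2 (List.getElem_mem hj))]
      unfold pvSpecList
      rw [pvSpecFrom_getElem? _ _ 0 j hj]
      simp
    · rw [List.getElem?_eq_none (by rw [pvItemsFold_length]; simpa using hj),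
        List.getElem?_eq_none (by rw [pvSpecList, pvSpecFrom_length]; omega)]
  rw [hres]

-- ===== VERDICT (by name: the statement is the Claim_ definition above) =====
theorem crop_and_deduplicate_names_spec : Claim_equal_crop_and_deduplicate_names := by
  intro names _ _
  unfold Spec_crop_and_deduplicate_names
  rw [pvPortA_eq, pvPortB_eq]
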